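-- pv_equiv track=rewrite | github.com/8ahmadreza3/IR_Project | compression.py | gap_decode
-- ===== SOURCE A (Python) =====
-- def gap_decode(gaps):
--     """
--     Gap Decoding: Reconstruct docIDs from gap values
--
--     Args:
--         gaps: list of gap values
--
--     Returns:
--         list of docID strings
--     """
--     if not gaps:
--         return []
--
--     numeric_ids = []
--     numeric_ids.append(gaps[0])
--
--     for i in range(1, len(gaps)):
--         numeric_ids.append(numeric_ids[i-1] + gaps[i])
--
--     # Convert back to docID strings
--     doc_ids = [f'Doc{doc_id}' for doc_id in numeric_ids]
--     return doc_ids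
-- ===== SOURCE B (Python) =====
-- def gap_decode(gaps):
--     # Build the docID list back-to-front: start from the total sum (the last
--     # docID) and peel off each gap while walking the gaps right-to-left.
--     total = sum(gaps)
--     out = []
--     for g in reversed(gaps):
--         out.append(f'Doc{total}')
--         total -= g
--     out.reverse()
--     return out
-- ===== Notes on version B (the rewrite author's own statement) =====
-- stated objective: alternative
-- what changed: Instead of accumulating prefix sums left-to-right, B computes the total sum once and reconstructs the docIDs right-to-left by successively subtracting gaps (suffix peeling), then reverses the collected list.
import Mathlib
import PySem

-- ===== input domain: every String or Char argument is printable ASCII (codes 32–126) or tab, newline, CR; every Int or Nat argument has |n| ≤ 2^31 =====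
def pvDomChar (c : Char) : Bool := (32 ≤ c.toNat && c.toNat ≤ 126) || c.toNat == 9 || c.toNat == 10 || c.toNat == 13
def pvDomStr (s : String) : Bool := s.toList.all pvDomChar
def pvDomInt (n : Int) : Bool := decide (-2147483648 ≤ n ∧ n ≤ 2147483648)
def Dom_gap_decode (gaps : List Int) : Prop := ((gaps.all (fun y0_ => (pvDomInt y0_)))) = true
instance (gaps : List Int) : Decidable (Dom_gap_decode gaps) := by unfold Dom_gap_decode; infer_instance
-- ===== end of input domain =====

-- B rebuilds the docIDs back-to-front: it takes the total sum once and walks the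
-- gaps right-to-left subtracting each gap, then reverses the collected list.

-- ===== PORT A =====
def gap_decode (gaps : List Int) : List String :=
  if gaps = [] then []
  else
    let numeric_ids : List Int :=
      (PySem.List.pyRange 1 (gaps.length : Int) 1).foldl
        (fun acc i =>
          acc ++ [PySem.List.pyGetD acc (i - 1) 0 + PySem.List.pyGetD gaps i 0])
        [PySem.List.pyGetD gaps 0 0]
    numeric_ids.map (fun doc_id => "Doc" ++ PySem.Int.toStr doc_id)

-- ===== PORT B =====
def gap_decode_alt (gaps : List Int) : List String :=
  (gaps.reverse.foldl
    (fun (st : Int × List String) g =>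
      (st.1 - g, st.2 ++ ["Doc" ++ PySem.Int.toStr st.1]))
    (gaps.sum, [])).2.reverse

-- ===== PRECONDITION & SPEC =====
def Spec_gap_decode (gaps : List Int) (out : List String) : Prop := out = gap_decode_alt gaps
instance (gaps : List Int) (out : List String) : Decidable (Spec_gap_decode gaps out) := by unfold Spec_gap_decode; infer_instance

-- ===== CLAIM (what is proved, stated in full; the proofs are below) =====
def Claim_equal_gap_decode : Prop := ∀ (gaps : List Int), Dom_gap_decode gaps → Spec_gap_decode gaps (gap_decode gaps)

-- ===== LEMMAS AND PROOFS =====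

-- prefix sum of the first (j+1) gaps: the j-th reconstructed docID number
def pvS (gaps : List Int) (j : Nat) : Int := (gaps.take (j + 1)).sum

-- B's fold unrolled: walking rs with starting total t emits t minus the partial sums
lemma pvB_foldl (rs : List Int) (t : Int) (acc : List String) :
    (rs.foldl
      (fun (st : Int × List String) g =>
        (st.1 - g, st.2 ++ ["Doc" ++ PySem.Int.toStr st.1]))
      (t, acc)).2
    = acc ++ (List.range rs.length).map
        (fun j => "Doc" ++ PySem.Int.toStr (t - (rs.take j).sum)) := by
  induction rs generalizing t acc with
  | nil => simp
  | cons g r ih =>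
    simp only [List.foldl_cons, ih, List.length_cons, List.range_succ_eq_map,
      List.map_cons, List.map_map, List.append_assoc]
    congr 1
    simp only [List.singleton_append]
    congr 1
    · simp
    · apply List.map_congr_left
      intro j _
      simp [Function.comp, List.take_succ_cons]
      ring_nf

-- A's loop invariant: after processing range(1, k), numeric_ids holds the first k prefix sums
lemma pvA_foldl (gaps : List Int) (hne : gaps ≠ []) (k : Nat) (hk1 : 1 ≤ k)
    (hk : k ≤ gaps.length) :
    (PySem.List.pyRange 1 (k : Int) 1).foldl
      (fun acc i =>
        acc ++ [PySem.List.pyGetD acc (i - 1) 0 + PySem.List.pyGetD gaps i 0])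
      [PySem.List.pyGetD gaps 0 0]
    = (List.range k).map (pvS gaps) := by
  induction k with
  | zero => omega
  | succ k ih =>
    rcases Nat.eq_or_lt_of_le hk1 with h1 | h1
    · -- k+1 = 1
      have : k = 0 := by omega
      subst this
      simp [PySem.List.pyRange_one_eq_nil, pvS, PySem.List.pyGetD_zero]
      cases gaps with
      | nil => exact absurd rfl hne
      | cons g r => simp
    · have hk1' : 1 ≤ k := by omega
      have hkl : k < gaps.length := by omega
      have hsplit : PySem.List.pyRange 1 ((k : Int) + 1) 1
          = PySem.List.pyRange 1 (k : Int) 1 ++ [(k : Int)] :=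
        PySem.List.pyRange_one_succ_right (by exact_mod_cast hk1')
      rw [show ((k + 1 : Nat) : Int) = (k : Int) + 1 by push_cast; ring, hsplit,
        List.foldl_append, ih hk1' (by omega)]
      simp only [List.foldl_cons, List.foldl_nil]
      have h1k : ((k : Int) - 1) = ((k - 1 : Nat) : Int) := by
        push_cast [Nat.cast_sub hk1']; ring
      rw [h1k]
      rw [List.range_succ, List.map_append]
      congr 1
      simp only [PySem.List.pyGetD_natCast, List.map_cons, List.map_nil]
      congr 1
      have hgl : ((List.range k).map (pvS gaps)).getD (k - 1) 0 = pvS gaps (k - 1) := by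
        rw [List.getD_eq_getElem?_getD]
        simp [List.getElem?_map, List.getElem?_range (show k - 1 < k by omega)]
      rw [hgl]
      have hgaps : gaps.getD k 0 = gaps[k] := List.getD_eq_getElem gaps 0 hkl
      rw [hgaps]
      have : k - 1 + 1 = k := by omega
      simp only [pvS, this]
      rw [List.sum_take_succ gaps k hkl]

-- B's reversed back-to-front list is exactly the prefix-sum list
lemma pvB_eq (gaps : List Int) :
    gap_decode_alt gaps
      = (List.range gaps.length).map (fun i => "Doc" ++ PySem.Int.toStr (pvS gaps i)) := by
  unfold gap_decode_alt
  rw [pvB_foldl gaps.reverse gaps.sum []]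
  simp only [List.nil_append, List.length_reverse]
  apply List.ext_getElem
  · simp
  · intro i h1 h2
    simp only [List.length_reverse, List.length_map, List.length_range] at h1
    rw [List.getElem_reverse]
    simp only [List.length_map, List.length_range]
    rw [List.getElem_map, List.getElem_map, List.getElem_range, List.getElem_range]
    congr 2
    have hm : gaps.length - 1 - i ≤ gaps.length := by omega
    rw [List.take_reverse]
    have hdrop : gaps.length - (gaps.length - 1 - i) = i + 1 := by omega
    rw [hdrop, List.sum_reverse, pvS]
    have := List.take_append_drop (i + 1) gaps
    have hsum : (gaps.take (i + 1)).sum + (gaps.drop (i + 1)).sum = gaps.sum := by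
      conv_rhs => rw [← this]
      rw [List.sum_append]
    omega

-- ===== VERDICT (by name: the statement is the Claim_ definition above) =====
theorem gap_decode_spec : Claim_equal_gap_decode := by
  intro gaps _
  unfold Spec_gap_decode
  rw [pvB_eq]
  unfold gap_decode
  by_cases hne : gaps = []
  · subst hne; simp
  · simp only [if_neg hne]
    have hlen : 1 ≤ gaps.length := by
      cases gaps with
      | nil => exact absurd rfl hne
      | cons g r => simp
    rw [pvA_foldl gaps hne gaps.length hlen le_rfl]
    simp [List.map_map, Function.comp]
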